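-- pv_equiv track=rewrite | github.com/ParkHoH/Algorithm_test | programmers/LV_2/더 맵게.py | solution
-- ===== SOURCE A (Python) =====
-- import heapq
--
-- def solution(scoville, K):
--     cnt = 0
--     heapq.heapify(scoville)
--     while scoville[0] < K:
--         if len(scoville) == 1:
--             return -1
--         else:
--             heapq.heappush(scoville, heapq.heappop(scoville) + heapq.heappop(scoville)*2)
--             cnt += 1
--     return cnt
-- ===== SOURCE B (Python) =====
-- def solution(scoville, K):
--     s = sorted(scoville)
--     cnt = 0
--     while s[0] < K:
--         if len(s) == 1:
--             return -1
--         s = _insert(s[0] + 2 * s[1], s[2:])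
--         cnt += 1
--     return cnt
--
-- def _insert(v, xs):
--     if not xs or v <= xs[0]:
--         return [v] + xs
--     return [xs[0]] + _insert(v, xs[1:])
-- ===== Notes on version B (the rewrite author's own statement) =====
-- stated objective: alternative
-- what changed: Replaces the binary heap (heapq heapify/heappop/heappush) by a plain sorted list: sort once, then repeatedly take the two head elements and re-insert their mix by ordered insertion; B also does not mutate the argument, so only the return value is claimed equal.
import Mathlib
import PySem

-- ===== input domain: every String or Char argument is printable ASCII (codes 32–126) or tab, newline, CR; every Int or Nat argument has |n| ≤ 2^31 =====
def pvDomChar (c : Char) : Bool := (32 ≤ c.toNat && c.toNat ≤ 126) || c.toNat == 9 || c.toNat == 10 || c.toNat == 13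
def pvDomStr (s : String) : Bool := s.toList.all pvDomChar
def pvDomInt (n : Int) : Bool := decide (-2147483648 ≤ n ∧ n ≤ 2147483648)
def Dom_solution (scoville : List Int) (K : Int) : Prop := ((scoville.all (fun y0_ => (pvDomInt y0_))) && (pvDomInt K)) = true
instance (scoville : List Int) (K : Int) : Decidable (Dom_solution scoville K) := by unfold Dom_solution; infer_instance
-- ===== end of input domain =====

-- B replaces A's binary heap (heapq) by a sorted list maintained by ordered insertion; A additionally
-- mutates its argument into heap order, which B does not do, so the equivalence proved is about the
-- RETURN value only.


-- ===== PORT A =====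
-- termination measures of the loop transcriptions (cited by name in decreasing_by)
theorem sd_dec (startpos pos : Nat) (h : startpos < pos) : (pos - 1) / 2 < pos := by omega

theorem su_dec (c e : Nat) (P : Prop) [Decidable P] (h : c < e) :
    e - (2 * (if P then c + 1 else c) + 1) < e - c := by split <;> omega

-- CPython heapq._siftdown: bubble the value `newitem` (sitting at index pos) up towards startpos.
def sdLoop (heap : List Int) (startpos pos : Nat) (newitem : Int) : List Int :=
  if _h : startpos < pos then
    let parentpos := (pos - 1) / 2
    let parent := heap.getD parentpos 0
    if newitem < parent then
      sdLoop (heap.set pos parent) startpos parentpos newitem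
    else heap.set pos newitem
  else heap.set pos newitem
termination_by pos
decreasing_by exact sd_dec _ _ _h

-- CPython heapq._siftup main loop: move the smaller child up until reaching a leaf; returns the
-- array after the final `heap[pos] = newitem` write together with the final pos.
def suLoop (heap : List Int) (pos childpos endpos : Nat) (newitem : Int) : List Int × Nat :=
  if childpos < endpos then
    let childpos :=
      if childpos + 1 < endpos ∧ ¬ (heap.getD childpos 0 < heap.getD (childpos + 1) 0)
      then childpos + 1 else childpos
    suLoop (heap.set pos (heap.getD childpos 0)) childpos (2 * childpos + 1) endpos newitem
  else (heap.set pos newitem, pos)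
termination_by endpos - childpos
decreasing_by exact su_dec _ _ _ (by assumption)

-- CPython heapq._siftup(heap, pos): descend to a leaf, then _siftdown(heap, startpos, pos);
-- _siftdown re-reads heap[pos], which the loop just set to newitem, so newitem is passed through.
def siftup (heap : List Int) (pos : Nat) : List Int :=
  let endpos := heap.length
  let startpos := pos
  let newitem := heap.getD pos 0
  let r := suLoop heap pos (2 * pos + 1) endpos newitem
  sdLoop r.1 startpos r.2 newitem

-- heapq.heapify: for i in reversed(range(n//2)): _siftup(x, i)
def heapify (x : List Int) : List Int :=
  (List.range (x.length / 2)).reverse.foldl (fun h i => siftup h i) x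

-- heapq.heappush: append, then _siftdown(heap, 0, len(heap)-1); _siftdown reads heap[-1] = item.
def heappush (heap : List Int) (item : Int) : List Int :=
  sdLoop (heap ++ [item]) 0 heap.length item

-- heapq.heappop: pop the last element; if the heap is nonempty put it at the root and _siftup.
def heappop (heap : List Int) : Int × List Int :=
  let lastelt := heap.getD (heap.length - 1) 0
  let h := heap.dropLast
  if h.isEmpty then (lastelt, h)
  else (h.getD 0 0, siftup (h.set 0 lastelt) 0)

theorem length_sdLoop (heap : List Int) (s p : Nat) (x : Int) :
    (sdLoop heap s p x).length = heap.length := by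
  fun_induction sdLoop <;> simp_all

theorem length_suLoop (heap : List Int) (p c e : Nat) (x : Int) :
    (suLoop heap p c e x).1.length = heap.length := by
  fun_induction suLoop <;> simp_all

theorem length_siftup (heap : List Int) (p : Nat) :
    (siftup heap p).length = heap.length := by
  simp [siftup, length_sdLoop, length_suLoop]

theorem length_heappop (heap : List Int) :
    (heappop heap).2.length = heap.length - 1 := by
  by_cases hE : heap.dropLast.isEmpty <;> simp [heappop, hE, length_siftup]

theorem length_heappush (heap : List Int) (x : Int) :
    (heappush heap x).length = heap.length + 1 := by
  simp [heappush, length_sdLoop]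

-- the while-loop of A's solution
theorem heapLoop_dec (heap : List Int) (v : Int) (h1 : ¬ heap.length = 1) :
    (heappush (heappop (heappop heap).2).2 v).length
      + (if (heappush (heappop (heappop heap).2).2 v).length = 0 then 2 else 0)
    < heap.length + (if heap.length = 0 then 2 else 0) := by
  rw [length_heappush, length_heappop, length_heappop]
  rcases Nat.eq_zero_or_pos heap.length with h0 | h0
  · rw [h0]
    norm_num
  · rw [if_neg (by omega), if_neg (by omega)]
    omega

def heapLoop (heap : List Int) (K cnt : Int) : Int :=
  if heap.getD 0 0 < K then
    if heap.length = 1 then -1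
    else
      let p1 := heappop heap
      let p2 := heappop p1.2
      heapLoop (heappush p2.2 (p1.1 + p2.1 * 2)) K (cnt + 1)
  else cnt
termination_by heap.length + (if heap.length = 0 then 2 else 0)
decreasing_by exact heapLoop_dec heap _ (by assumption)

def solution (scoville : List Int) (K : Int) : Int :=
  heapLoop (heapify scoville) K 0

-- ===== PORT B =====
-- _insert(v, xs): ordered insertion into a sorted list
def bInsert (v : Int) (xs : List Int) : List Int :=
  match xs with
  | [] => [v]
  | x :: t => if v ≤ x then v :: x :: t else x :: bInsert v t

theorem length_bInsert (v : Int) (xs : List Int) :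
    (bInsert v xs).length = xs.length + 1 := by
  induction xs with
  | nil => rfl
  | cons x t ih => simp only [bInsert]; split <;> simp [ih]

theorem altLoop_dec (s : List Int) (v : Int) (h1 : ¬ s.length = 1) :
    (bInsert v (s.drop 2)).length
      + (if (bInsert v (s.drop 2)).length = 0 then 2 else 0)
    < s.length + (if s.length = 0 then 2 else 0) := by
  rw [length_bInsert, List.length_drop]
  rcases Nat.eq_zero_or_pos s.length with h0 | h0
  · rw [h0]
    norm_num
  · rw [if_neg (by omega), if_neg (by omega)]
    omega

-- the while-loop of B's solution, over the sorted working list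
def altLoop (s : List Int) (K cnt : Int) : Int :=
  if s.getD 0 0 < K then
    if s.length = 1 then -1
    else altLoop (bInsert (s.getD 0 0 + 2 * s.getD 1 0) (s.drop 2)) K (cnt + 1)
  else cnt
termination_by s.length + (if s.length = 0 then 2 else 0)
decreasing_by exact altLoop_dec s _ (by assumption)

def solution_alt (scoville : List Int) (K : Int) : Int :=
  altLoop (PySem.List.sorted scoville (fun x => x) false) K 0

-- ===== PRECONDITION & SPEC =====
-- Pre_ excludes only the empty list, on which A (scoville[0]) raises IndexError; B raises there too.
def Pre_solution (scoville : List Int) (_K : Int) : Prop := scoville ≠ []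
instance (scoville : List Int) (K : Int) : Decidable (Pre_solution scoville K) := by
  unfold Pre_solution; infer_instance

def pvWitness_solution : List Int × Int := ([1, 2, 3, 9, 10, 12], 7)

def Spec_solution (scoville : List Int) (K : Int) (out : Int) : Prop := out = solution_alt scoville K
instance (scoville : List Int) (K : Int) (out : Int) : Decidable (Spec_solution scoville K out) := by
  unfold Spec_solution; infer_instance

-- ===== CLAIM (what is proved, stated in full; the proofs are below) =====
def Claim_equal_solution : Prop := ∀ (scoville : List Int) (K : Int), Dom_solution scoville K → Pre_solution scoville K → Spec_solution scoville K (solution scoville K)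

-- ===== LEMMAS AND PROOFS =====

-- glue: getD after set
theorem getD_set_self (l : List Int) (i : Nat) (a : Int) (h : i < l.length) :
    (l.set i a).getD i 0 = a := by
  simp [List.getD_eq_getElem?_getD, List.getElem?_set_self h]

theorem getD_set_ne (l : List Int) (i j : Nat) (a : Int) (h : i ≠ j) :
    (l.set i a).getD j 0 = l.getD j 0 := by
  simp [List.getD_eq_getElem?_getD, List.getElem?_set_ne h]

theorem count_set (l : List Int) (i : Nat) (a z : Int) (h : i < l.length) :
    (l.set i a).count z + (if l.getD i 0 = z then 1 else 0)
      = l.count z + (if a = z then 1 else 0) := by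
  induction l generalizing i with
  | nil => simp at h
  | cons y t ih =>
    cases i with
    | zero =>
      simp [List.count_cons]
      split_ifs <;> simp_all
    | succ m =>
      have hm : m < t.length := by simpa using h
      have hrec := ih m hm
      simp only [List.set_cons_succ, List.getD_cons_succ, List.count_cons]
      split_ifs at hrec ⊢ <;> omega

theorem replace_perm (l : List Int) (p q : Nat) (b : Int)
    (hp : p < l.length) (hq : q < l.length) (hpq : p ≠ q) :
    ((l.set p (l.getD q 0)).set q b).Perm (l.set p b) := by
  rw [List.perm_iff_count]
  intro z
  have h1 := count_set l p (l.getD q 0) z hp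
  have h2 := count_set (l.set p (l.getD q 0)) q b z (by simpa using hq)
  have h3 := count_set l p b z hp
  rw [getD_set_ne l p q _ hpq] at h2
  split_ifs at h1 h2 h3 <;> omega

-- multiset effect of the sift loops: the value at the sift position is replaced by newitem
theorem sdLoop_perm (heap : List Int) (s p : Nat) (x : Int) :
    p < heap.length → (sdLoop heap s p x).Perm (heap.set p x) := by
  fun_induction sdLoop with
  | case1 h p hsp pp parent hlt ih =>
    intro hp
    have hpp : pp < h.length := by omega
    have hne : p ≠ pp := by omega
    exact (ih (by simpa using hpp)).trans (replace_perm h p pp x hp hpp hne)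
  | case2 h p hsp pp parent hge =>
    intro _; exact List.Perm.refl _
  | case3 h p hsp =>
    intro _; exact List.Perm.refl _

theorem suLoop_facts (heap : List Int) (pos c e : Nat) (x : Int) :
    e = heap.length → pos < e → pos < c →
    (suLoop heap pos c e x).1.Perm (heap.set pos x) ∧
    (suLoop heap pos c e x).2 < e ∧
    (suLoop heap pos c e x).1.getD (suLoop heap pos c e x).2 0 = x := by
  fun_induction suLoop with
  | case1 h p c hce cp ih =>
    intro he hp hc
    have hcp : c ≤ cp ∧ cp < e := by
      simp only [cp]; split <;> omega
    obtain ⟨ihp, ihq, ihg⟩ := ih (by simpa using he) (by omega) (by omega)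
    refine ⟨ihp.trans (replace_perm h p cp x (by omega) (by omega) (by omega)), ihq, ihg⟩
  | case2 h p c hce =>
    intro he hp hc
    exact ⟨List.Perm.refl _, hp, getD_set_self h p x (by omega)⟩

theorem set_getD_self (l : List Int) (i : Nat) (h : i < l.length) :
    l.set i (l.getD i 0) = l := by
  rw [List.getD_eq_getElem l 0 h]
  exact List.set_getElem_self h

theorem siftup_perm (heap : List Int) (pos : Nat) (hp : pos < heap.length) :
    (siftup heap pos).Perm heap := by
  unfold siftup
  set x := heap.getD pos 0 with hx
  set r := suLoop heap pos (2 * pos + 1) heap.length x with hr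
  obtain ⟨hperm, hq, hg⟩ :=
    suLoop_facts heap pos (2 * pos + 1) heap.length x rfl hp (by omega)
  rw [← hr] at hperm hq hg
  have hlen : r.1.length = heap.length := by
    rw [hr]; exact length_suLoop heap pos (2 * pos + 1) heap.length x
  have h1 := sdLoop_perm r.1 pos r.2 x (by omega)
  have h2 : r.1.set r.2 x = r.1 := by
    conv_lhs => rw [← hg]
    exact set_getD_self r.1 r.2 (by omega)
  rw [h2] at h1
  have h3 : heap.set pos x = heap := set_getD_self heap pos hp
  exact h1.trans (h3 ▸ hperm)

-- tree vocabulary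
def par (j : Nat) : Nat := (j - 1) / 2

theorem par_lt (j : Nat) (h : 0 < j) : par j < j := by unfold par; omega

-- s is an ancestor (in the implicit binary-tree order) of q
def Anc (s q : Nat) : Prop := ∃ k, par^[k] q = s

theorem anc_refl (s : Nat) : Anc s s := ⟨0, rfl⟩

theorem par_iterate_le (k q : Nat) : par^[k] q ≤ q := by
  induction k generalizing q with
  | zero => simp
  | succ k ih =>
    rw [Function.iterate_succ_apply]
    exact le_trans (ih (par q)) (by unfold par; omega)

theorem anc_le (s q : Nat) (h : Anc s q) : s ≤ q := by
  rcases h with ⟨k, hk⟩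
  rw [← hk]; exact par_iterate_le k q

theorem anc_step (s q : Nat) (h : Anc s q) (hlt : s < q) : Anc s (par q) := by
  rcases h with ⟨k, hk⟩
  cases k with
  | zero => simp at hk; omega
  | succ m => exact ⟨m, by rwa [Function.iterate_succ_apply] at hk⟩

theorem anc_up (s q : Nat) (h : Anc s (par q)) : Anc s q := by
  rcases h with ⟨k, hk⟩
  exact ⟨k + 1, by rwa [Function.iterate_succ_apply]⟩

theorem anc_zero (q : Nat) : Anc 0 q := by
  induction q using Nat.strong_induction_on with
  | _ q ih =>
    rcases Nat.eq_zero_or_pos q with h | h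
    · exact h ▸ anc_refl 0
    · exact anc_up 0 q (ih (par q) (par_lt q h))

-- heap property for all nodes whose parent index is ≥ i
def PH (h : List Int) (i : Nat) : Prop :=
  ∀ j, j < h.length → i ≤ par j → h.getD (par j) 0 ≤ h.getD j 0

-- precondition of the bubble-up loop sdLoop with a hole at q holding garbage:
-- pairs not involving q hold, children of q are ≥ x, and (below the start) ≥ the hole's parent
def SDpre (a : List Int) (s q : Nat) (x : Int) : Prop :=
  q < a.length ∧ Anc s q ∧
  (∀ j, j < a.length → j ≠ q → s ≤ par j → a.getD (par j) 0 ≤ a.getD j 0) ∧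
  (∀ c, c < a.length → c ≠ q → par c = q → x ≤ a.getD c 0) ∧
  (s < q → ∀ c, c < a.length → c ≠ q → par c = q → a.getD (par q) 0 ≤ a.getD c 0)

theorem getD_set_ite (l : List Int) (i : Nat) (a : Int) (hi : i < l.length) (j : Nat) :
    (l.set i a).getD j 0 = if j = i then a else l.getD j 0 := by
  by_cases hj : j = i
  · subst hj; rw [if_pos rfl]; exact getD_set_self l j a hi
  · rw [if_neg hj]; exact getD_set_ne l i j a (fun hh => hj hh.symm)

-- the common stopping case of sdLoop: write x at the hole q
theorem sd_stop (a : List Int) (s q : Nat) (x : Int)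
    (hq : q < a.length) (_hanc : Anc s q)
    (C2 : ∀ j, j < a.length → j ≠ q → s ≤ par j → a.getD (par j) 0 ≤ a.getD j 0)
    (C3 : ∀ c, c < a.length → c ≠ q → par c = q → x ≤ a.getD c 0)
    (hok : s = q ∨ a.getD (par q) 0 ≤ x) :
    PH (a.set q x) s := by
  intro j hj hsj
  rw [List.length_set] at hj
  rw [getD_set_ite a q x hq, getD_set_ite a q x hq]
  by_cases hjq : j = q
  · subst hjq
    by_cases hpq : par j = j
    · rw [hpq]
    · rw [if_neg hpq, if_pos rfl]
      rcases hok with heq | hok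
      · have hj0 : 0 < j := by
          by_contra hc
          exact hpq (by unfold par; omega)
        have := par_lt j hj0
        omega
      · exact hok
  · by_cases hpj : par j = q
    · rw [hpj, if_pos rfl, if_neg hjq]
      exact C3 j hj hjq hpj
    · rw [if_neg hpj, if_neg hjq]
      exact C2 j hj hjq hsj

theorem sd_heap (a : List Int) (s q : Nat) (x : Int) :
    SDpre a s q x → PH (sdLoop a s q x) s := by
  fun_induction sdLoop with
  | case1 a q hsq pp parent hlt ih =>
    rintro ⟨hq, hanc, C2, C3, C3t⟩
    have hq0 : 0 < q := by omega
    have hpar : par q = pp := by unfold par; rfl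
    have hpplt : pp < q := by omega
    have hancpp : Anc s pp := hpar ▸ anc_step s q hanc hsq
    have hpps : s ≤ pp := anc_le s pp hancpp
    have hparent : parent = a.getD pp 0 := rfl
    apply ih
    refine ⟨by simp; omega, hancpp, ?_, ?_, ?_⟩
    · -- C2 for the new hole pp
      intro j hj _hjpp hsj
      rw [List.length_set] at hj
      rw [getD_set_ite a q parent hq, getD_set_ite a q parent hq]
      by_cases hjq : j = q
      · subst hjq
        rw [hpar, if_neg (by omega)]
        simp [hparent]
      · by_cases hpj : par j = q
        · rw [hpj, if_pos rfl, if_neg hjq]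
          have h3 := C3t hsq j hj hjq hpj
          rw [hpar] at h3
          exact hparent ▸ h3
        · rw [if_neg hpj, if_neg hjq]
          exact C2 j hj hjq hsj
    · -- children of pp are ≥ x
      intro c hc _hcpp hpc
      rw [List.length_set] at hc
      rw [getD_set_ite a q parent hq]
      by_cases hcq : c = q
      · rw [if_pos hcq]; exact le_of_lt hlt
      · rw [if_neg hcq]
        have h2 := C2 c hc hcq (by rw [hpc]; exact hpps)
        rw [hpc] at h2
        exact le_trans (le_of_lt hlt) (hparent ▸ h2)
    · -- bridging at the new hole pp
      intro hspp c hc _hcpp hpc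
      rw [List.length_set] at hc
      have hparpp_ne : par pp ≠ q := by
        have := par_lt pp (by omega)
        omega
      rw [getD_set_ite a q parent hq, getD_set_ite a q parent hq, if_neg hparpp_ne]
      have happ : s ≤ par pp := anc_le s (par pp) (anc_step s pp hancpp hspp)
      have hbase : a.getD (par pp) 0 ≤ a.getD pp 0 := C2 pp (by omega) (by omega) happ
      by_cases hcq : c = q
      · rw [if_pos hcq]; exact hparent ▸ hbase
      · rw [if_neg hcq]
        have h2 := C2 c hc hcq (by rw [hpc]; exact hpps)
        rw [hpc] at h2
        exact le_trans hbase h2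
  | case2 a q hsq pp parent hge =>
    rintro ⟨hq, hanc, C2, C3, _C3t⟩
    have hpar : par q = pp := by unfold par; rfl
    exact sd_stop a s q x hq hanc C2 C3 (Or.inr (by rw [hpar]; omega))
  | case3 a q hsq =>
    rintro ⟨hq, hanc, C2, C3, _C3t⟩
    have hse : s = q := by have := anc_le s q hanc; omega
    exact sd_stop a s q x hq hanc C2 C3 (Or.inl hse)

theorem su_heap (heap : List Int) (pos c e : Nat) (x : Int) (s : Nat) :
    e = heap.length → pos < e → c = 2 * pos + 1 → Anc s pos →
    (∀ j, j < heap.length → j ≠ pos → s ≤ par j → par j ≠ pos →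
        heap.getD (par j) 0 ≤ heap.getD j 0) →
    (s < pos → ∀ c', c' < heap.length → c' ≠ pos → par c' = pos →
        heap.getD (par pos) 0 ≤ heap.getD c' 0) →
    SDpre (suLoop heap pos c e x).1 s (suLoop heap pos c e x).2 x := by
  fun_induction suLoop with
  | case1 a p c hce cp ih =>
    intro he hp hc hanc hJ2 hJ3
    have hcp_cases : (cp = c + 1 ∧ c + 1 < e ∧ a.getD (c + 1) 0 ≤ a.getD c 0) ∨
        (cp = c ∧ (¬ (c + 1 < e) ∨ a.getD c 0 < a.getD (c + 1) 0)) := by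
      simp only [cp]
      split
      · rename_i hcond
        exact Or.inl ⟨rfl, hcond.1, by omega⟩
      · rename_i hcond
        rcases not_and_or.mp hcond with h1 | h1
        · exact Or.inr ⟨rfl, Or.inl h1⟩
        · exact Or.inr ⟨rfl, Or.inr (by omega)⟩
    have hcp_lt : cp < e := by rcases hcp_cases with ⟨h1, h2, _⟩ | ⟨h1, _⟩ <;> omega
    have hcp_gt : p < cp := by rcases hcp_cases with ⟨h1, _, _⟩ | ⟨h1, _⟩ <;> omega
    have hpar_cp : par cp = p := by
      unfold par
      rcases hcp_cases with ⟨h1, _, _⟩ | ⟨h1, _⟩ <;> omega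
    have hmin : ∀ c', c' < e → c' ≠ p → par c' = p → a.getD cp 0 ≤ a.getD c' 0 := by
      intro c' hc' hc'p hpc'
      have hcc : c' = c ∨ c' = c + 1 := by unfold par at hpc'; omega
      rcases hcp_cases with ⟨h1, h2, h3⟩ | ⟨h1, h2⟩
      · rcases hcc with rfl | rfl
        · rw [h1]; exact h3
        · rw [h1]
      · rcases hcc with rfl | rfl
        · rw [h1]
        · rw [h1]
          rcases h2 with h2 | h2
          · omega
          · omega
    have hval := getD_set_ite a p (a.getD cp 0) (by omega)
    apply ih
    · simpa using he
    · exact hcp_lt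
    · rfl
    · exact anc_up s cp (hpar_cp ▸ hanc)
    · -- J2 for the new hole cp
      intro j hj hjcp hsj hpjcp
      rw [List.length_set] at hj
      rw [hval, hval]
      by_cases hjp : j = p
      · subst hjp
        by_cases hpp : par j = j
        · rw [hpp]
        · rw [if_neg hpp, if_pos rfl]
          have hsp : s < j := by
            have := anc_le s j hanc
            have := par_lt j (by by_contra hzero; exact hpp (by unfold par; omega))
            omega
          exact hJ3 hsp cp (by omega) (by omega) hpar_cp
      · by_cases hpjp : par j = p
        · rw [hpjp, if_pos rfl, if_neg hjp]
          exact hmin j (by omega) hjp hpjp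
        · rw [if_neg hpjp, if_neg hjp]
          exact hJ2 j hj hjp hsj hpjp
    · -- J3 for the new hole cp
      intro hscp c'' hc'' hccp hpccp
      rw [List.length_set] at hc''
      rw [hval, hval, hpar_cp, if_pos rfl]
      have hcgt : cp < c'' := by unfold par at hpccp; omega
      rw [if_neg (by omega)]
      have h := hJ2 c'' hc'' (by omega) (by rw [hpccp]; omega) (by omega)
      rw [hpccp] at h
      exact h
  | case2 a p c hce =>
    intro he hp hc hanc hJ2 hJ3
    have hval := getD_set_ite a p x (by omega)
    refine ⟨by simp; omega, hanc, ?_, ?_, ?_⟩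
    · intro j hj hjp hsj
      rw [List.length_set] at hj
      have hpjp : par j ≠ p := by unfold par; omega
      rw [hval, hval, if_neg hpjp, if_neg hjp]
      exact hJ2 j hj hjp hsj hpjp
    · intro c' hc' hc'p hpc'
      rw [List.length_set] at hc'
      exfalso
      unfold par at hpc'
      omega
    · intro hsp c' hc' hc'p hpc'
      rw [List.length_set] at hc'
      exfalso
      unfold par at hpc'
      omega

theorem siftup_heap (heap : List Int) (pos : Nat) (hp : pos < heap.length)
    (hph : PH heap (pos + 1)) : PH (siftup heap pos) pos := by
  unfold siftup
  apply sd_heap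
  apply su_heap heap pos (2 * pos + 1) heap.length _ pos rfl hp rfl (anc_refl pos)
  · intro j hj hjp hsj hpjp
    exact hph j hj (by omega)
  · omega

theorem heapify_aux (k : Nat) : ∀ h : List Int, 2 * k ≤ h.length → PH h k →
    ((List.range k).reverse.foldl (fun h i => siftup h i) h).Perm h ∧
    PH ((List.range k).reverse.foldl (fun h i => siftup h i) h) 0 := by
  induction k with
  | zero =>
    intro h _ hph
    exact ⟨List.Perm.refl _, hph⟩
  | succ k ih =>
    intro h hlen hph
    rw [List.range_succ, List.reverse_append]
    simp only [List.reverse_singleton, List.singleton_append, List.foldl_cons]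
    have hk : k < h.length := by omega
    have h1 := siftup_perm h k hk
    have hlen1 : (siftup h k).length = h.length := length_siftup h k
    have h2 := siftup_heap h k hk hph
    obtain ⟨p, q⟩ := ih (siftup h k) (by omega) h2
    exact ⟨p.trans h1, q⟩

theorem heapify_facts (x : List Int) : (heapify x).Perm x ∧ PH (heapify x) 0 := by
  unfold heapify
  apply heapify_aux (x.length / 2) x (by omega)
  intro j hj hge
  rcases Nat.eq_zero_or_pos j with rfl | hj0
  · exact le_refl _
  · exfalso; unfold par at hge; omega

theorem heap_root_le (h : List Int) (hph : PH h 0) :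
    ∀ j, j < h.length → h.getD 0 0 ≤ h.getD j 0 := by
  intro j
  induction j using Nat.strong_induction_on with
  | _ j ih =>
    intro hj
    rcases Nat.eq_zero_or_pos j with h0 | h0
    · subst h0; exact le_refl _
    · have hpar : par j < j := par_lt j h0
      exact le_trans (ih (par j) hpar (lt_trans hpar hj)) (hph j hj (Nat.zero_le _))

theorem getD_dropLast (l : List Int) (j : Nat) (hj : j < l.dropLast.length) :
    l.dropLast.getD j 0 = l.getD j 0 := by
  rw [List.getD_eq_getElem _ _ hj, List.getD_eq_getElem _ _ (by simp at hj; omega)]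
  exact List.getElem_dropLast hj

theorem heappop_fst (h : List Int) (hne : h ≠ []) : (heappop h).1 = h.getD 0 0 := by
  have hpos := List.length_pos_of_ne_nil hne
  by_cases hE : h.dropLast.isEmpty
  · have hl : h.length = 1 := by
      rw [List.isEmpty_iff] at hE
      have := congrArg List.length hE
      simp at this
      omega
    simp [heappop, hE, hl]
  · have hl : 0 < h.dropLast.length :=
      List.length_pos_of_ne_nil (by simpa [List.isEmpty_iff] using hE)
    simp only [heappop, hE, Bool.false_eq_true, if_false]
    exact getD_dropLast h 0 hl

theorem heappop_perm (h : List Int) (hne : h ≠ []) :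
    ((heappop h).1 :: (heappop h).2).Perm h := by
  have hpos := List.length_pos_of_ne_nil hne
  by_cases hE : h.dropLast.isEmpty
  · have hl : h.length = 1 := by
      rw [List.isEmpty_iff] at hE
      have := congrArg List.length hE
      simp at this
      omega
    obtain ⟨a, ha⟩ := List.length_eq_one_iff.mp hl
    subst ha
    simp [heappop]
  · have h1ne : h.dropLast ≠ [] := by simpa [List.isEmpty_iff] using hE
    obtain ⟨b, t, hbt⟩ := List.exists_cons_of_ne_nil h1ne
    have hl : 0 < h.dropLast.length := List.length_pos_of_ne_nil h1ne
    simp only [heappop, hE, Bool.false_eq_true, if_false]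
    have hset : h.dropLast.set 0 (h.getD (h.length - 1) 0)
        = (h.getD (h.length - 1) 0) :: t := by rw [hbt]; rfl
    have hsp := siftup_perm (h.dropLast.set 0 (h.getD (h.length - 1) 0)) 0 (by simpa using hl)
    refine ((hsp.cons _).trans ?_)
    rw [hset, hbt]
    rw [List.getD_cons_zero]
    -- b :: L :: t ~ h = (b :: t) ++ [L]
    have hlast : h.getD (h.length - 1) 0 = h.getLast hne := by
      rw [List.getLast_eq_getElem]
      exact List.getD_eq_getElem _ _ (by omega)
    have hdecomp : h = (b :: t) ++ [h.getLast hne] := by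
      rw [← hbt, List.dropLast_append_getLast hne]
    conv_rhs => rw [hdecomp]
    rw [hlast]
    exact (List.perm_append_singleton _ t).symm.cons b

theorem heappop_heap (h : List Int) (hph : PH h 0) : PH (heappop h).2 0 := by
  by_cases hE : h.dropLast.isEmpty
  · simp only [heappop, hE, if_pos]
    intro j hj
    rw [List.isEmpty_iff] at hE
    simp [hE] at hj
  · have h1ne : h.dropLast ≠ [] := by simpa [List.isEmpty_iff] using hE
    have hl : 0 < h.dropLast.length := List.length_pos_of_ne_nil h1ne
    simp only [heappop, hE, Bool.false_eq_true, if_false]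
    apply siftup_heap _ 0 (by simpa using hl)
    intro j hj hge
    rw [List.length_set] at hj
    have hj1 : 1 ≤ j := by
      by_contra hc
      unfold par at hge
      omega
    have hpj1 : 1 ≤ par j := hge
    rw [getD_set_ne _ _ _ _ (by omega), getD_set_ne _ _ _ _ (by omega),
      getD_dropLast h (par j) (by have := par_lt j (by omega); omega),
      getD_dropLast h j hj]
    exact hph j (by simp at hj; omega) (Nat.zero_le _)

theorem heappush_perm (h : List Int) (v : Int) : (heappush h v).Perm (v :: h) := by
  unfold heappush
  have h1 := sdLoop_perm (h ++ [v]) 0 h.length v (by simp)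
  rw [List.set_append_right _ _ (le_refl _)] at h1
  simp only [Nat.sub_self, List.set_cons_zero] at h1
  exact h1.trans (List.perm_append_singleton v h)

theorem getD_append_left (l1 l2 : List Int) (j : Nat) (hj : j < l1.length) :
    (l1 ++ l2).getD j 0 = l1.getD j 0 := by
  rw [List.getD_eq_getElem?_getD, List.getD_eq_getElem?_getD, List.getElem?_append_left hj]

theorem heappush_heap (h : List Int) (v : Int) (hph : PH h 0) : PH (heappush h v) 0 := by
  unfold heappush
  apply sd_heap
  refine ⟨by simp, anc_zero _, ?_, ?_, ?_⟩
  · intro j hj hjq _hsj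
    rw [List.length_append, List.length_singleton] at hj
    have hjlt : j < h.length := by omega
    rw [getD_append_left _ _ _ hjlt, getD_append_left _ _ _ (by unfold par; omega)]
    exact hph j hjlt (Nat.zero_le _)
  · intro c hc hcq hpc
    rw [List.length_append, List.length_singleton] at hc
    exfalso; unfold par at hpc; omega
  · intro h0 c hc hcq hpc
    rw [List.length_append, List.length_singleton] at hc
    exfalso; unfold par at hpc; omega

-- B-side lemmas
theorem bInsert_perm (v : Int) (xs : List Int) : (bInsert v xs).Perm (v :: xs) := by
  induction xs with
  | nil => rfl
  | cons x t ih =>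
    simp only [bInsert]
    split
    · exact List.Perm.refl _
    · exact ((ih.cons x).trans (List.Perm.swap v x t))

theorem bInsert_sorted (v : Int) (xs : List Int) (hs : xs.Pairwise (· ≤ ·)) :
    (bInsert v xs).Pairwise (· ≤ ·) := by
  induction xs with
  | nil => simp [bInsert]
  | cons x t ih =>
    simp only [bInsert]
    rcases List.pairwise_cons.mp hs with ⟨hx, ht⟩
    split
    · rename_i hvx
      refine List.pairwise_cons.mpr ⟨?_, hs⟩
      intro b hb
      rcases List.mem_cons.mp hb with rfl | hb
      · omega
      · exact le_trans hvx (hx b hb)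
    · rename_i hvx
      refine List.pairwise_cons.mpr ⟨?_, ih ht⟩
      intro b hb
      rcases List.mem_cons.mp ((bInsert_perm v t).mem_iff.mp hb) with rfl | hb
      · omega
      · exact hx b hb

-- head of a sorted nonempty list is its minimum
theorem sorted_head_min (s : List Int) (hs : s.Pairwise (· ≤ ·)) (hne : s ≠ []) :
    ∀ y ∈ s, s.getD 0 0 ≤ y := by
  cases s with
  | nil => simp at hne
  | cons a t =>
    intro y hy
    rcases List.pairwise_cons.mp hs with ⟨ha, _⟩
    rcases List.mem_cons.mp hy with rfl | hy
    · simp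
    · simpa using ha y hy

-- a heap's root is its minimum, as a membership statement
theorem heap_min_mem (h : List Int) (hph : PH h 0) : ∀ y ∈ h, h.getD 0 0 ≤ y := by
  intro y hy
  rcases List.getElem_of_mem hy with ⟨j, hj, rfl⟩
  have := heap_root_le h hph j hj
  simpa [List.getD_eq_getElem?_getD, List.getElem?_eq_getElem hj] using this

-- the two minima of permuted collections agree
theorem min_unique (h s : List Int) (hperm : h.Perm s) (hne : h ≠ [])
    (hmh : ∀ y ∈ h, h.getD 0 0 ≤ y) (hms : ∀ y ∈ s, s.getD 0 0 ≤ y) :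
    h.getD 0 0 = s.getD 0 0 := by
  have hsne : s ≠ [] := by
    intro hs0; subst hs0; exact hne (List.Perm.eq_nil hperm)
  have h0 : h.getD 0 0 ∈ h := by
    have := List.length_pos_of_ne_nil hne
    simp [List.getD_eq_getElem?_getD, List.getElem?_eq_getElem this]
  have s0 : s.getD 0 0 ∈ s := by
    have := List.length_pos_of_ne_nil hsne
    simp [List.getD_eq_getElem?_getD, List.getElem?_eq_getElem this]
  have h1 := hmh (s.getD 0 0) (hperm.mem_iff.mpr s0)
  have h2 := hms (h.getD 0 0) (hperm.mem_iff.mp h0)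
  omega

-- main bridge: the heap loop and the sorted-list loop agree
theorem loop_eq (n : Nat) : ∀ (h s : List Int) (K cnt : Int), h.length ≤ n → h ≠ [] →
    PH h 0 → h.Perm s → s.Pairwise (· ≤ ·) → heapLoop h K cnt = altLoop s K cnt := by
  induction n with
  | zero =>
    intro h s K cnt hlen hne _ _ _
    exact absurd (List.eq_nil_of_length_eq_zero (by omega)) hne
  | succ n ih =>
    intro h s K cnt hlen hne hph hperm hsorted
    have hlen_eq : h.length = s.length := hperm.length_eq
    have hsne : s ≠ [] := by
      intro h0
      subst h0
      exact hne (List.eq_nil_of_length_eq_zero (by simpa using hlen_eq))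
    have hhead : h.getD 0 0 = s.getD 0 0 :=
      min_unique h s hperm hne (heap_min_mem h hph) (sorted_head_min s hsorted hsne)
    rw [heapLoop, altLoop, hhead, hlen_eq]
    by_cases hK : s.getD 0 0 < K
    · rw [if_pos hK, if_pos hK]
      by_cases h1 : s.length = 1
      · rw [if_pos h1, if_pos h1]
      · rw [if_neg h1, if_neg h1]
        -- s has at least two elements
        obtain ⟨a, t, hat⟩ := List.exists_cons_of_ne_nil hsne
        have htne : t ≠ [] := by
          intro h0
          apply h1
          rw [hat, h0]
          rfl
        obtain ⟨b, u, hbu⟩ := List.exists_cons_of_ne_nil htne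
        have hs2 : s = a :: b :: u := by rw [hat, hbu]
        subst hs2
        have hp1fst : (heappop h).1 = a := by
          rw [heappop_fst h hne, hhead]; rfl
        have hp1perm : (heappop h).2.Perm (b :: u) := by
          have := (heappop_perm h hne).trans hperm
          rw [hp1fst] at this
          exact this.cons_inv
        have hp1heap := heappop_heap h hph
        have hp1ne : (heappop h).2 ≠ [] := by
          intro h0
          have := hp1perm.length_eq
          rw [h0] at this
          simp at this
        have hsorted' : (b :: u).Pairwise (· ≤ ·) := (List.pairwise_cons.mp hsorted).2
        have hp2fst : (heappop (heappop h).2).1 = b := by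
          rw [heappop_fst _ hp1ne,
            min_unique (heappop h).2 (b :: u) hp1perm hp1ne
              (heap_min_mem _ hp1heap) (sorted_head_min _ hsorted' (by simp))]
          rfl
        have hp2perm : (heappop (heappop h).2).2.Perm u := by
          have := (heappop_perm _ hp1ne).trans hp1perm
          rw [hp2fst] at this
          exact this.cons_inv
        have hp2heap := heappop_heap _ hp1heap
        have hveq : (heappop h).1 + (heappop (heappop h).2).1 * 2
            = a + 2 * b := by rw [hp1fst, hp2fst]; ring
        have hgets : (a :: b :: u).getD 0 0 + 2 * (a :: b :: u).getD 1 0 = a + 2 * b := rfl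
        have hdrop : (a :: b :: u).drop 2 = u := rfl
        show heapLoop (heappush (heappop (heappop h).2).2
            ((heappop h).1 + (heappop (heappop h).2).1 * 2)) K (cnt + 1)
          = altLoop (bInsert ((a :: b :: u).getD 0 0 + 2 * (a :: b :: u).getD 1 0)
            (List.drop 2 (a :: b :: u))) K (cnt + 1)
        rw [hveq, hgets, hdrop]
        apply ih
        · rw [length_heappush, length_heappop, length_heappop]
          have : 2 ≤ h.length := by rw [hlen_eq]; simp
          omega
        · intro h0
          have := congrArg List.length h0
          rw [length_heappush] at this
          simp at this
        · exact heappush_heap _ _ hp2heap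
        · exact (heappush_perm _ _).trans ((hp2perm.cons _).trans (bInsert_perm _ u).symm)
        · exact bInsert_sorted _ u (List.pairwise_cons.mp hsorted').2
    · rw [if_neg hK, if_neg hK]

-- ===== VERDICT (by name: the statement is the Claim_ definition above) =====
theorem solution_spec : Claim_equal_solution := by
  intro scoville K _dom pre
  unfold Spec_solution solution solution_alt
  rcases heapify_facts scoville with ⟨hperm, hheap⟩
  have hsp : (PySem.List.sorted scoville (fun x => x) false).Perm scoville :=
    PySem.List.sorted_perm scoville (fun x => x) false
  refine loop_eq scoville.length (heapify scoville) _ K 0 hperm.length_eq.le ?_ hheap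
    (hperm.trans hsp.symm) ?_
  · intro h0
    have hl := hperm.length_eq
    rw [h0] at hl
    exact pre (List.eq_nil_of_length_eq_zero (by simpa using hl.symm))
  · simpa using PySem.List.sorted_pairwise scoville (fun x => x)
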